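-- pv_equiv track=rewrite | github.com/DipperChen2007/Skibidi_Enhancer | S/13/13_s2.py | Bridge_Transport
-- ===== SOURCE A (Python) =====
-- def Bridge_Transport(max_weight,lst):
--     current_train = []
--     current_weight = 0
--     i = 0
--     answer = 0
--     while current_weight <= max_weight and i < len(lst):
--
--         if len(current_train) == 4:
--             current_weight -= current_train[0]
--             current_train.pop(0)
--             if current_weight + lst[i] > max_weight:
--                 return answer
--             else:
--                 current_train.append(lst[i])
--                 current_weight += lst[i]
--                 i += 1
--                 answer += 1
--         else:
--             if current_weight + lst[i] > max_weight:
--                 return answer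
--             else:
--                 current_train.append(lst[i])
--                 current_weight += lst[i]
--                 i+=1
--                 answer += 1
--     return answer
-- ===== SOURCE B (Python) =====
-- def Bridge_Transport(max_weight, lst):
--     # Empty train already weighs 0; a negative limit admits nothing.
--     if max_weight < 0:
--         return 0
--     prefix = [0]
--     for w in lst:
--         prefix.append(prefix[-1] + w)
--     for i in range(len(lst)):
--         if prefix[i + 1] - prefix[max(0, i - 3)] > max_weight:
--             return i
--     return len(lst)
-- ===== Notes on version B (the rewrite author's own statement) =====
-- stated objective: alternative
-- what changed: Replaces the mutable 4-item train window simulation with a prefix-sum array: each candidate i is tested via prefix[i+1]-prefix[max(0,i-3)] > max_weight, with an initial guard for a negative limit (the empty train of weight 0 already exceeds it).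
import Mathlib
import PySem

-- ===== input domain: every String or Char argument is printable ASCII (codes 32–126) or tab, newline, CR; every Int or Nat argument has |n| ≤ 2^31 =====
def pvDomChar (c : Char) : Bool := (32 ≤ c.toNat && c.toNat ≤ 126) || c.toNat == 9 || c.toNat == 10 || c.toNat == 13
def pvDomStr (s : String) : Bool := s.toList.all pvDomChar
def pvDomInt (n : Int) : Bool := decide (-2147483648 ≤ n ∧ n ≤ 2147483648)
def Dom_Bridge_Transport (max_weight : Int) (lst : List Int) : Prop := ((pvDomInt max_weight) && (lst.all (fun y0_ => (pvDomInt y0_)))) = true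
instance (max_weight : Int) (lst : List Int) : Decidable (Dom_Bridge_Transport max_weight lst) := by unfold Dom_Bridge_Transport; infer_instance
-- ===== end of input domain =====

-- B replaces A's mutable sliding 4-item window with a prefix-sum array scan (alternative decomposition, same cost).


-- ===== PORT A =====
-- A's while loop; state (current_train, current_weight, i, answer); answer == i throughout,
-- ported with i : Nat and fuel lst.length - i for termination.
def pvLoopA (mw : Int) (lst : List Int) (train : List Int) (cw : Int) (i : Nat) (ans : Int) : Int :=
  if cw ≤ mw ∧ i < lst.length then
    let x := lst.getD i 0          -- lst[i]; i < len(lst) holds here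
    if train.length = 4 then
      let cw' := cw - train.headD 0   -- current_weight -= current_train[0]
      let train' := train.drop 1      -- current_train.pop(0)
      if cw' + x > mw then ans
      else pvLoopA mw lst (train' ++ [x]) (cw' + x) (i + 1) (ans + 1)
    else
      if cw + x > mw then ans
      else pvLoopA mw lst (train ++ [x]) (cw + x) (i + 1) (ans + 1)
  else ans
termination_by lst.length - i
decreasing_by all_goals omega

def Bridge_Transport (max_weight : Int) (lst : List Int) : Int :=
  pvLoopA max_weight lst [] 0 0 0

-- ===== PORT B =====
-- prefix = [0]; for w in lst: prefix.append(prefix[-1] + w)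
def pvPrefixB (lst : List Int) : List Int :=
  lst.foldl (fun acc w => acc ++ [acc.getLastD 0 + w]) [0]

-- for i in range(len(lst)): if prefix[i+1] - prefix[max(0,i-3)] > max_weight: return i
def pvScanB (mw : Int) (pre : List Int) (n : Nat) (i : Nat) : Int :=
  if i < n then
    if pre.getD (i + 1) 0 - pre.getD (i - 3) 0 > mw then (i : Int)
    else pvScanB mw pre n (i + 1)
  else (n : Int)
termination_by n - i
decreasing_by omega

def Bridge_Transport_alt (max_weight : Int) (lst : List Int) : Int :=
  if max_weight < 0 then 0
  else pvScanB max_weight (pvPrefixB lst) lst.length 0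

-- ===== PRECONDITION & SPEC =====
def Spec_Bridge_Transport (max_weight : Int) (lst : List Int) (out : Int) : Prop := out = Bridge_Transport_alt max_weight lst
instance (max_weight : Int) (lst : List Int) (out : Int) : Decidable (Spec_Bridge_Transport max_weight lst out) := by unfold Spec_Bridge_Transport; infer_instance

-- ===== CLAIM (what is proved, stated in full; the proofs are below) =====
def Claim_equal_Bridge_Transport : Prop := ∀ (max_weight : Int) (lst : List Int), Dom_Bridge_Transport max_weight lst → Spec_Bridge_Transport max_weight lst (Bridge_Transport max_weight lst)

-- ===== LEMMAS AND PROOFS =====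

-- prefix list characterisation: (pvPrefixB lst).getD k 0 = sum of first k elements (k ≤ lst.length)
theorem pvPrefixB_eq (lst : List Int) :
    pvPrefixB lst = (List.range (lst.length + 1)).map (fun k => ((lst.take k).sum)) := by
  induction lst using List.reverseRecOn with
  | nil => simp [pvPrefixB]
  | append_singleton l w ih =>
    have hstep : pvPrefixB (l ++ [w]) = pvPrefixB l ++ [(pvPrefixB l).getLastD 0 + w] := by
      unfold pvPrefixB
      rw [List.foldl_append]
      rfl
    have hlast : (pvPrefixB l).getLastD 0 = l.sum := by
      rw [ih, List.range_succ, List.map_append]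
      simp
    rw [hstep, hlast, ih]
    have hlen : (l ++ [w]).length + 1 = (l.length + 1) + 1 := by simp
    rw [hlen, List.range_succ (n := l.length + 1), List.map_append]
    congr 1
    · apply List.map_congr_left
      intro k hk
      have hk' : k ≤ l.length := by
        have := List.mem_range.mp hk; omega
      rw [List.take_append_of_le_length hk']
    · simp

theorem pvPrefixB_getD (lst : List Int) (k : Nat) (hk : k ≤ lst.length) :
    (pvPrefixB lst).getD k 0 = (lst.take k).sum := by
  rw [pvPrefixB_eq]
  rw [List.getD_eq_getElem?_getD, List.getElem?_map, List.getElem?_range (by omega)]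
  simp

-- sum of the window lst[a..b) as a difference of prefix sums
theorem sum_drop_take (lst : List Int) (a b : Nat) (hab : a ≤ b) :
    ((lst.take b).drop a).sum = (lst.take b).sum - (lst.take a).sum := by
  have h1 : (lst.take b).take a ++ (lst.take b).drop a = lst.take b := List.take_append_drop a _
  have h2 : (lst.take b).take a = lst.take a := by
    rw [List.take_take, Nat.min_eq_left hab]
  have h3 : (lst.take b).sum = (lst.take a).sum + ((lst.take b).drop a).sum := by
    conv_lhs => rw [← h1]
    rw [List.sum_append, h2]
  omega

-- sum of the tail after popping the head
theorem sum_drop_one (l : List Int) : l.sum - l.headD 0 = (l.drop 1).sum := by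
  cases l with
  | nil => simp
  | cons h t => simp [List.sum_cons]

-- main loop invariant
theorem loop_eq_scan (mw : Int) (lst : List Int) (_hmw : 0 ≤ mw) :
    ∀ i, i ≤ lst.length →
      ((lst.take i).drop (i - 4)).sum ≤ mw →
      pvLoopA mw lst ((lst.take i).drop (i - 4)) ((lst.take i).drop (i - 4)).sum i (i : Int)
        = pvScanB mw (pvPrefixB lst) lst.length i := by
  suffices H : ∀ d i, i ≤ lst.length → lst.length - i = d →
      ((lst.take i).drop (i - 4)).sum ≤ mw →
      pvLoopA mw lst ((lst.take i).drop (i - 4)) ((lst.take i).drop (i - 4)).sum i (i : Int)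
        = pvScanB mw (pvPrefixB lst) lst.length i by
    intro i hi hw; exact H _ i hi rfl hw
  intro d
  induction d with
  | zero =>
    intro i hi hd hw
    have hin : i = lst.length := by omega
    rw [pvLoopA, pvScanB, if_neg (by omega), if_neg (by omega), hin]
  | succ d ih =>
    intro i hi hd hw
    have hi' : i < lst.length := by omega
    have htakelen : (lst.take i).length = i := by
      rw [List.length_take]; omega
    have htake : lst.take (i + 1) = lst.take i ++ [lst.getD i 0] := by
      rw [List.take_add_one, List.getElem?_eq_getElem hi']
      simp [List.getD_eq_getElem?_getD, List.getElem?_eq_getElem hi']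
    have hkey : ((lst.take (i + 1)).drop (i - 3)).sum
        = (pvPrefixB lst).getD (i + 1) 0 - (pvPrefixB lst).getD (i - 3) 0 := by
      rw [pvPrefixB_getD _ _ (by omega), pvPrefixB_getD _ _ (by omega),
        sum_drop_take _ _ _ (by omega)]
    have happ : (lst.take (i + 1)).drop (i - 3)
        = (lst.take i).drop (i - 3) ++ [lst.getD i 0] := by
      rw [htake, List.drop_append_of_le_length (by omega)]
    rw [pvLoopA, pvScanB, if_pos ⟨hw, hi'⟩, if_pos hi']
    have hWlen : ((lst.take i).drop (i - 4)).length = i - (i - 4) := by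
      rw [List.length_drop, htakelen]
    have hidx : i + 1 - 4 = i - 3 := by omega
    by_cases h4 : 4 ≤ i
    · -- window already holds 4 items
      rw [if_pos (by rw [hWlen]; omega)]
      have hW1 : ((lst.take i).drop (i - 4)).drop 1 = (lst.take i).drop (i - 3) := by
        rw [List.drop_drop]; congr 1; omega
      have hval : ((lst.take i).drop (i - 4)).sum - ((lst.take i).drop (i - 4)).headD 0
          + lst.getD i 0
          = (pvPrefixB lst).getD (i + 1) 0 - (pvPrefixB lst).getD (i - 3) 0 := by
        rw [sum_drop_one, hW1, ← hkey, happ, List.sum_append]; simp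
      dsimp only
      rw [hval]
      split_ifs with hcmp
      · rfl
      · have harg : ((lst.take i).drop (i - 4)).drop 1 ++ [lst.getD i 0]
            = (lst.take (i + 1)).drop ((i + 1) - 4) := by
          rw [hW1, ← happ, hidx]
        have hsum : ((lst.take i).drop (i - 4)).sum - ((lst.take i).drop (i - 4)).headD 0
            + lst.getD i 0 = ((lst.take (i + 1)).drop ((i + 1) - 4)).sum := by
          rw [hval, ← hkey, hidx]
        rw [harg, ← hval, hsum]
        have := ih (i + 1) (by omega) (by omega)
          (by rw [← hsum, hval]; omega)
        rw [← this]
        norm_cast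
    · -- window holds fewer than 4 items
      rw [if_neg (by rw [hWlen]; omega)]
      have hW0 : (lst.take i).drop (i - 4) = lst.take i := by
        have h0 : i - 4 = 0 := by omega
        rw [h0, List.drop_zero]
      have hW0' : (lst.take i).drop (i - 3) = lst.take i := by
        have h0 : i - 3 = 0 := by omega
        rw [h0, List.drop_zero]
      have hval : ((lst.take i).drop (i - 4)).sum + lst.getD i 0
          = (pvPrefixB lst).getD (i + 1) 0 - (pvPrefixB lst).getD (i - 3) 0 := by
        rw [← hkey, happ, List.sum_append, hW0, hW0']; simp
      rw [hval]
      split_ifs with hcmp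
      · rfl
      · have harg : (lst.take i).drop (i - 4) ++ [lst.getD i 0]
            = (lst.take (i + 1)).drop ((i + 1) - 4) := by
          rw [hW0]
          have h0 : (i + 1) - 4 = 0 := by omega
          rw [h0, List.drop_zero, htake]
        have hsum : ((lst.take i).drop (i - 4)).sum + lst.getD i 0
            = ((lst.take (i + 1)).drop ((i + 1) - 4)).sum := by
          rw [← harg, List.sum_append]; simp
        rw [harg, ← hval, hsum]
        have := ih (i + 1) (by omega) (by omega)
          (by rw [← hsum, hval]; omega)
        rw [← this]
        norm_cast

-- ===== VERDICT (by name: the statement is the Claim_ definition above) =====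
theorem Bridge_Transport_spec : Claim_equal_Bridge_Transport := by
  intro mw lst _
  unfold Spec_Bridge_Transport Bridge_Transport Bridge_Transport_alt
  by_cases h : mw < 0
  · simp only [if_pos h]
    unfold pvLoopA
    rw [if_neg (by omega)]
  · simp only [if_neg h]
    have := loop_eq_scan mw lst (not_lt.mp h) 0 (by omega) (by simpa using not_lt.mp h)
    simpa using this
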